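-- pv_equiv track=rewrite | github.com/hannahk0901/mbti-personality-app | mbti_backend/api/views.py | determineGroup
-- ===== SOURCE A (Python) =====
-- def determineGroup(top2):
--     groupMatches = {
--         1: ['Fi', 'Te', 'Ne', 'Si'],
--         2: ['Fe', 'Ti', 'Ni', 'Se'],
--         3: ['Fi', 'Te', 'Ni', 'Se'],
--         4: ['Ti', 'Ne', 'Si', 'Fe']
--     }
--     for group, funcs in groupMatches.items():
--         if top2[0] in funcs and top2[1] in funcs:
--             return group
--     return None
-- ===== SOURCE B (Python) =====
-- def determineGroup(top2):
--     # Inverted index: function code -> ascending list of group numbers containing it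
--     # (derived once from the fixed groupMatches table).
--     index = {'Fi': [1, 3], 'Te': [1, 3], 'Ne': [1, 4], 'Si': [1, 4],
--              'Fe': [2, 4], 'Ti': [2, 4], 'Ni': [2, 3], 'Se': [2, 3]}
--     g0 = index.get(top2[0])
--     if g0 is None:
--         return None
--     g1 = index.get(top2[1], [])
--     common = [g for g in g0 if g in g1]
--     return common[0] if common else None
-- ===== Notes on version B (the rewrite author's own statement) =====
-- stated objective: alternative
-- what changed: Replaces the scan over the four groups with membership tests by a precomputed inverted index (code -> ascending group list) and an intersection whose first element is the answer.
import Mathlib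
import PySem

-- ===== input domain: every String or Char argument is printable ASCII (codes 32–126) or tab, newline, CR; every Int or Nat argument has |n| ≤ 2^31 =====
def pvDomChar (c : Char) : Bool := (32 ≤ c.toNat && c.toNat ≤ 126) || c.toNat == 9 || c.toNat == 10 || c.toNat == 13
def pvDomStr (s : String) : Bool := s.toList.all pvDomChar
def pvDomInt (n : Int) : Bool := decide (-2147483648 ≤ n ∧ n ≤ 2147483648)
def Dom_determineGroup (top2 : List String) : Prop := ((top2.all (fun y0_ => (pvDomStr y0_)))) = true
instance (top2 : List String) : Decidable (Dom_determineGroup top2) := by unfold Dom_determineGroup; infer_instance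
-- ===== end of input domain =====

-- B replaces A's scan over the four groups by a precomputed inverted index (code -> group list)
-- and an intersection; different decomposition, similar cost (objective: alternative).


-- ===== PORT A =====
-- the fixed groupMatches table, in dict insertion order
def groupMatches : List (Int × List String) :=
  [(1, ["Fi", "Te", "Ne", "Si"]),
   (2, ["Fe", "Ti", "Ni", "Se"]),
   (3, ["Fi", "Te", "Ni", "Se"]),
   (4, ["Ti", "Ne", "Si", "Fe"])]

-- the 'for group, funcs in groupMatches.items()' loop; top2[0]/top2[1] via pyGet?
-- (none = IndexError, excluded by Pre_), 'and' short-circuits as in Python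
def detLoop (top2 : List String) : List (Int × List String) → Option Int
  | [] => none
  | (g, fs) :: rest =>
    match PySem.List.pyGet? top2 0 with
    | none => none  -- IndexError (outside Pre_)
    | some a =>
      if fs.contains a then
        match PySem.List.pyGet? top2 1 with
        | none => none  -- IndexError (outside Pre_)
        | some b => if fs.contains b then some g else detLoop top2 rest
      else detLoop top2 rest

def determineGroup (top2 : List String) : Option Int := detLoop top2 groupMatches

-- ===== PORT B =====
-- inverted index: function code -> ascending list of group numbers (dict.get as assoc lookup)
def invIndex : List (String × List Int) :=
  [("Fi", [1, 3]), ("Te", [1, 3]), ("Ne", [1, 4]), ("Si", [1, 4]),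
   ("Fe", [2, 4]), ("Ti", [2, 4]), ("Ni", [2, 3]), ("Se", [2, 3])]

def idxGet (s : String) : Option (List Int) :=
  (invIndex.find? (fun p => p.1 == s)).map Prod.snd

def determineGroup_alt (top2 : List String) : Option Int :=
  match PySem.List.pyGet? top2 0 with
  | none => none  -- IndexError (outside Pre_)
  | some a =>
    match idxGet a with
    | none => none
    | some g0 =>
      match PySem.List.pyGet? top2 1 with
      | none => none  -- IndexError (outside Pre_)
      | some b =>
        let g1 := (idxGet b).getD []
        let common := g0.filter (fun g => g1.contains g)
        common.head?

-- ===== PRECONDITION & SPEC =====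
def allCodes : List String := ["Fi", "Te", "Ne", "Si", "Fe", "Ti", "Ni", "Se"]

-- Pre_ excludes exactly the inputs where the Python A raises IndexError: the empty list,
-- and one-element lists whose element is one of the eight function codes (A then evaluates top2[1]).
def Pre_determineGroup (top2 : List String) : Prop :=
  2 ≤ top2.length ∨ (top2.length = 1 ∧ ∀ a ∈ top2, a ∉ allCodes)
instance (top2 : List String) : Decidable (Pre_determineGroup top2) := by
  unfold Pre_determineGroup; infer_instance

def pvWitness_determineGroup : List String := ["Fi", "Te"]

def Spec_determineGroup (top2 : List String) (out : Option Int) : Prop := out = determineGroup_alt top2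
instance (top2 : List String) (out : Option Int) : Decidable (Spec_determineGroup top2 out) := by unfold Spec_determineGroup; infer_instance

-- ===== CLAIM (what is proved, stated in full; the proofs are below) =====
def Claim_equal_determineGroup : Prop := ∀ (top2 : List String), Dom_determineGroup top2 → Pre_determineGroup top2 → Spec_determineGroup top2 (determineGroup top2)

-- ===== LEMMAS AND PROOFS =====

-- exhaustive case split of a string against the eight codes
lemma string_cases (s : String) :
    s = "Fi" ∨ s = "Te" ∨ s = "Ne" ∨ s = "Si" ∨ s = "Fe" ∨ s = "Ti" ∨ s = "Ni" ∨ s = "Se" ∨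
      s ∉ allCodes := by
  by_cases h : s ∈ allCodes
  · simp only [allCodes, List.mem_cons, List.not_mem_nil, or_false] at h
    tauto
  · tauto

lemma idxGet_of_not_mem (s : String) (h : s ∉ allCodes) : idxGet s = none := by
  simp only [allCodes, List.mem_cons, List.not_mem_nil, or_false, not_or] at h
  obtain ⟨h1, h2, h3, h4, h5, h6, h7, h8⟩ := h
  simp only [idxGet, invIndex, List.find?,
    beq_eq_false_iff_ne.mpr (Ne.symm h1), beq_eq_false_iff_ne.mpr (Ne.symm h2),
    beq_eq_false_iff_ne.mpr (Ne.symm h3), beq_eq_false_iff_ne.mpr (Ne.symm h4),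
    beq_eq_false_iff_ne.mpr (Ne.symm h5), beq_eq_false_iff_ne.mpr (Ne.symm h6),
    beq_eq_false_iff_ne.mpr (Ne.symm h7), beq_eq_false_iff_ne.mpr (Ne.symm h8),
    Option.map_none]

-- outside the eight codes, every group's membership test is false
lemma contains_of_not_mem (s : String) (h : s ∉ allCodes) (fs : List String)
    (hfs : fs = ["Fi", "Te", "Ne", "Si"] ∨ fs = ["Fe", "Ti", "Ni", "Se"] ∨
           fs = ["Fi", "Te", "Ni", "Se"] ∨ fs = ["Ti", "Ne", "Si", "Fe"]) :
    fs.contains s = false := by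
  simp only [allCodes, List.mem_cons, List.not_mem_nil, or_false, not_or] at h
  obtain ⟨h1, h2, h3, h4, h5, h6, h7, h8⟩ := h
  rcases hfs with rfl | rfl | rfl | rfl <;>
    simp only [List.contains_cons, List.contains_nil,
      beq_eq_false_iff_ne.mpr h1, beq_eq_false_iff_ne.mpr h2, beq_eq_false_iff_ne.mpr h3,
      beq_eq_false_iff_ne.mpr h4, beq_eq_false_iff_ne.mpr h5, beq_eq_false_iff_ne.mpr h6,
      beq_eq_false_iff_ne.mpr h7, beq_eq_false_iff_ne.mpr h8,
      Bool.or_self, Bool.or_false, Bool.false_or]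

-- each group's membership test, re-expressed through the inverted index
lemma bridge1 (x : String) :
    (["Fi", "Te", "Ne", "Si"] : List String).contains x = ((idxGet x).getD []).contains 1 := by
  rcases string_cases x with rfl | rfl | rfl | rfl | rfl | rfl | rfl | rfl | hx <;>
    first
    | decide
    | (rw [contains_of_not_mem x hx _ (by tauto), idxGet_of_not_mem x hx]; rfl)

lemma bridge2 (x : String) :
    (["Fe", "Ti", "Ni", "Se"] : List String).contains x = ((idxGet x).getD []).contains 2 := by
  rcases string_cases x with rfl | rfl | rfl | rfl | rfl | rfl | rfl | rfl | hx <;>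
    first
    | decide
    | (rw [contains_of_not_mem x hx _ (by tauto), idxGet_of_not_mem x hx]; rfl)

lemma bridge3 (x : String) :
    (["Fi", "Te", "Ni", "Se"] : List String).contains x = ((idxGet x).getD []).contains 3 := by
  rcases string_cases x with rfl | rfl | rfl | rfl | rfl | rfl | rfl | rfl | hx <;>
    first
    | decide
    | (rw [contains_of_not_mem x hx _ (by tauto), idxGet_of_not_mem x hx]; rfl)

lemma bridge4 (x : String) :
    (["Ti", "Ne", "Si", "Fe"] : List String).contains x = ((idxGet x).getD []).contains 4 := by
  rcases string_cases x with rfl | rfl | rfl | rfl | rfl | rfl | rfl | rfl | hx <;>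
    first
    | decide
    | (rw [contains_of_not_mem x hx _ (by tauto), idxGet_of_not_mem x hx]; rfl)

-- the index takes one of five values
lemma idxGet_cases (x : String) :
    idxGet x = none ∨ idxGet x = some [1, 3] ∨ idxGet x = some [1, 4] ∨
      idxGet x = some [2, 4] ∨ idxGet x = some [2, 3] := by
  rcases string_cases x with rfl | rfl | rfl | rfl | rfl | rfl | rfl | rfl | hx <;>
    first
    | decide
    | exact Or.inl (idxGet_of_not_mem x hx)

lemma pair_eq (a b : String) (rest : List String) :
    determineGroup (a :: b :: rest) = determineGroup_alt (a :: b :: rest) := by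
  have e0 : PySem.List.pyGet? (a :: b :: rest) 0 = some a :=
    PySem.List.pyGet?_zero_cons a (b :: rest)
  have e1 : PySem.List.pyGet? (a :: b :: rest) 1 = some b := by
    rw [show (1 : Int) = ((1 : Nat) : Int) by norm_num, PySem.List.pyGet?_natCast]
    rfl
  simp only [determineGroup, determineGroup_alt, detLoop, groupMatches, e0, e1,
    bridge1 a, bridge1 b, bridge2 a, bridge2 b, bridge3 a, bridge3 b, bridge4 a, bridge4 b]
  rcases idxGet_cases a with h | h | h | h | h <;>
    rcases idxGet_cases b with h' | h' | h' | h' | h' <;> rw [h, h'] <;> rfl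

lemma single_eq (a : String) (ha : a ∉ allCodes) :
    determineGroup [a] = determineGroup_alt [a] := by
  have e0 : PySem.List.pyGet? [a] 0 = some a :=
    PySem.List.pyGet?_zero_cons a []
  simp only [determineGroup, determineGroup_alt, detLoop, groupMatches, e0,
    bridge1 a, bridge2 a, bridge3 a, bridge4 a]
  rw [idxGet_of_not_mem a ha]
  rfl

-- ===== VERDICT (by name: the statement is the Claim_ definition above) =====
theorem determineGroup_spec : Claim_equal_determineGroup := by
  intro top2 _ hpre
  unfold Spec_determineGroup
  match top2, hpre with
  | [], h => rcases h with h | ⟨h, _⟩ <;> simp at h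
  | [a], h =>
    rcases h with h | ⟨_, h⟩
    · simp at h
    · exact single_eq a (h a (by simp))
  | a :: b :: rest, _ => exact pair_eq a b rest
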